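-- pv_equiv track=rewrite | github.com/XENON1T/pax | pax/plugins/signal_processing/PeakProcessing.py | cluster_by_separation
-- ===== SOURCE A (Python) =====
-- def cluster_by_separation(x, separation_length):
--     # Returns list of lists of indices of clusters in x
--     # TODO: put in dsputils, test exhaustively
--     if len(x) == 0:
--         return []
--     clusters = []
--     current_cluster = []
--     previous_t = x[0]
--     for i, t in enumerate(x):
--         if t - previous_t > separation_length:
--             clusters.append(current_cluster)
--             current_cluster = []
--         current_cluster.append(i)
--         previous_t = t
--     clusters.append(current_cluster)
--     return clusters
-- ===== SOURCE B (Python) =====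
-- def cluster_by_separation(x, separation_length):
--     # Boundary-table decomposition: first list every break position (index whose
--     # gap from its predecessor exceeds separation_length; index 0 is compared
--     # against x[0] itself, matching the original's previous_t initialisation),
--     # then partition the index range at those positions.
--     n = len(x)
--     if n == 0:
--         return []
--     boundaries = [i for i in range(n)
--                   if x[i] - x[i - 1 if i > 0 else 0] > separation_length]
--     groups = []
--     start = 0
--     for b in boundaries:
--         groups.append(list(range(start, b)))
--         start = b
--     groups.append(list(range(start, n)))
--     return groups
-- ===== Notes on version B (the rewrite author's own statement) =====
-- stated objective: alternative
-- what changed: Replaces A's single stateful loop carrying (clusters, current_cluster, previous_t) by a two-phase decomposition: first a boundary table of break indices, then partitioning the index range into consecutive slices at those boundaries.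
import Mathlib
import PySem

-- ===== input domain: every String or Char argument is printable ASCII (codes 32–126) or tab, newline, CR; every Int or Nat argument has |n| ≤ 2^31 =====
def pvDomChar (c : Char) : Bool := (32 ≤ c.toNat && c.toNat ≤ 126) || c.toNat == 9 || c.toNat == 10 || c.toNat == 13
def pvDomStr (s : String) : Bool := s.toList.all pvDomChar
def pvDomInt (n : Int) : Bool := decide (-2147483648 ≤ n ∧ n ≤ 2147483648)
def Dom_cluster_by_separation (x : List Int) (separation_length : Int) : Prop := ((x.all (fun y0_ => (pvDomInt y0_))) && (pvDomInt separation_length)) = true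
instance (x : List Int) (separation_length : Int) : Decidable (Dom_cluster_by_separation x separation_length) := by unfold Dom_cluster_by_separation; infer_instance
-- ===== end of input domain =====

-- B replaces A's running-state loop by a boundary table plus range partitioning (same O(n) cost, different decomposition); equivalence is proved on all inputs.

-- ===== PORT A =====
-- literal transliteration of A: fold over enumerate(x) carrying (clusters, current_cluster, previous_t)
def cluster_by_separation (x : List Int) (separation_length : Int) : List (List Int) :=
  if x.length = 0 then []
  else
    -- x[0]: in range because x is nonempty, so pyGetD agrees with Python's x[0]
    let previous_t : Int := PySem.List.pyGetD x 0 0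
    let st := (PySem.List.enumerate x 0).foldl
      (fun (st : List (List Int) × List Int × Int) p =>
        if p.2 - st.2.2 > separation_length then
          (st.1 ++ [st.2.1], ([] : List Int) ++ [p.1], p.2)
        else
          (st.1, st.2.1 ++ [p.1], p.2))
      ([], [], previous_t)
    st.1 ++ [st.2.1]

-- ===== PORT B =====
-- literal transliteration of B: boundary table, then partition the index range at the boundaries
def cluster_by_separation_alt (x : List Int) (separation_length : Int) : List (List Int) :=
  let n : Int := x.length
  if n = 0 then []
  else
    -- indices i and (i-1 if i>0 else 0) are always in range, so pyGetD agrees with Python's x[...]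
    let boundaries := (PySem.List.pyRange 0 n 1).filter
      (fun i => PySem.List.pyGetD x i 0 - PySem.List.pyGetD x (if i > 0 then i - 1 else 0) 0 > separation_length)
    let st := boundaries.foldl
      (fun (st : List (List Int) × Int) b => (st.1 ++ [PySem.List.pyRange st.2 b 1], b))
      (([] : List (List Int)), (0 : Int))
    st.1 ++ [PySem.List.pyRange st.2 n 1]

-- ===== PRECONDITION & SPEC =====
def Spec_cluster_by_separation (x : List Int) (separation_length : Int) (out : List (List Int)) : Prop := out = cluster_by_separation_alt x separation_length
instance (x : List Int) (separation_length : Int) (out : List (List Int)) : Decidable (Spec_cluster_by_separation x separation_length out) := by unfold Spec_cluster_by_separation; infer_instance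

-- ===== CLAIM (what is proved, stated in full; the proofs are below) =====
def Claim_equal_cluster_by_separation : Prop := ∀ (x : List Int) (separation_length : Int), Dom_cluster_by_separation x separation_length → Spec_cluster_by_separation x separation_length (cluster_by_separation x separation_length)

-- ===== LEMMAS AND PROOFS =====

-- common specification: the cluster list produced from suffix ys, next index k, current open cluster cur, previous value prev
def gSpec (s : Int) : Int → Int → List Int → List Int → List (List Int)
  | _, _, cur, [] => [cur]
  | prev, k, cur, t :: ys =>
    if t - prev > s then cur :: gSpec s t (k + 1) [k] ys
    else gSpec s t (k + 1) (cur ++ [k]) ys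

-- B's partitioning of [start, n) at the boundary list
def hSpec (n : Int) : Int → List Int → List (List Int)
  | start, [] => [PySem.List.pyRange start n 1]
  | start, b :: bs => PySem.List.pyRange start b 1 :: hSpec n b bs

theorem lemA (s : Int) : ∀ (ys : List Int) (cls : List (List Int)) (cur : List Int) (prev k : Int),
    (let st := (PySem.List.enumerate ys k).foldl
      (fun (st : List (List Int) × List Int × Int) p =>
        if p.2 - st.2.2 > s then
          (st.1 ++ [st.2.1], ([] : List Int) ++ [p.1], p.2)
        else
          (st.1, st.2.1 ++ [p.1], p.2))
      (cls, cur, prev)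
     st.1 ++ [st.2.1]) = cls ++ gSpec s prev k cur ys := by
  intro ys
  induction ys with
  | nil => intro cls cur prev k; simp [PySem.List.enumerate_nil, gSpec]
  | cons t ys ih =>
    intro cls cur prev k
    rw [PySem.List.enumerate_cons]
    simp only [List.foldl_cons]
    by_cases h : t - prev > s
    · rw [if_pos h, ih (cls ++ [cur]) ([] ++ [k]) t (k + 1)]
      simp [gSpec, h]
    · rw [if_neg h, ih cls (cur ++ [k]) t (k + 1)]
      simp [gSpec, h]

theorem lemB (n : Int) : ∀ (bs : List Int) (gs : List (List Int)) (start : Int),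
    (let st := bs.foldl
      (fun (st : List (List Int) × Int) b => (st.1 ++ [PySem.List.pyRange st.2 b 1], b))
      (gs, start)
     st.1 ++ [PySem.List.pyRange st.2 n 1]) = gs ++ hSpec n start bs := by
  intro bs
  induction bs with
  | nil => intro gs start; simp [hSpec]
  | cons b bs ih =>
    intro gs start
    simp only [List.foldl_cons]
    rw [ih (gs ++ [PySem.List.pyRange start b 1]) b]
    simp [hSpec]

theorem lemBridge (x : List Int) (s : Int) :
    ∀ (ys : List Int) (k start : Int),
    0 ≤ start → start ≤ k → x.drop k.toNat = ys → k + (ys.length : Int) = (x.length : Int) →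
    gSpec s (PySem.List.pyGetD x (if k > 0 then k - 1 else 0) 0) k (PySem.List.pyRange start k 1) ys
      = hSpec (x.length : Int) start
          ((PySem.List.pyRange k (x.length : Int) 1).filter
            (fun i => PySem.List.pyGetD x i 0 - PySem.List.pyGetD x (if i > 0 then i - 1 else 0) 0 > s)) := by
  intro ys
  induction ys with
  | nil =>
    intro k start h0 hsk hdrop hlen
    simp only [List.length_nil, Int.natCast_zero, add_zero] at hlen
    rw [hlen]
    rw [PySem.List.pyRange_one_eq_nil (le_refl _)]
    simp [gSpec, hSpec]
  | cons t ys ih =>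
    intro k start h0 hsk hdrop hlen
    have hk0 : 0 ≤ k := le_trans h0 hsk
    have hkn : k < (x.length : Int) := by
      simp only [List.length_cons] at hlen; omega
    have hxk : PySem.List.pyGetD x k 0 = t := by
      have h1 : x[k.toNat]? = some t := by
        rw [← List.head?_drop, hdrop]; rfl
      rw [PySem.List.pyGetD_of_nonneg x 0 hk0]
      simp [List.getD, h1]
    have hdrop' : x.drop (k + 1).toNat = ys := by
      have : (k + 1).toNat = k.toNat + 1 := by omega
      rw [this, ← List.drop_drop, hdrop]
      rfl
    rw [PySem.List.pyRange_one_cons hkn]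
    simp only [List.filter_cons]
    simp only [gSpec]
    by_cases h : t - PySem.List.pyGetD x (if k > 0 then k - 1 else 0) 0 > s
    · have hp : (PySem.List.pyGetD x k 0 - PySem.List.pyGetD x (if k > 0 then k - 1 else 0) 0 > s) := by
        rw [hxk]; exact h
      rw [if_pos h]
      simp only [hp, decide_true, if_true]
      simp only [hSpec]
      have hidx : (if k + 1 > 0 then k + 1 - 1 else 0) = k := by
        rw [if_pos (by omega)]; ring
      have := ih (k + 1) k hk0 (by omega) hdrop' (by simp only [List.length_cons] at hlen ⊢; omega)
      rw [hidx, hxk, PySem.List.pyRange_one_singleton k] at this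
      rw [this]
    · have hp : ¬ (PySem.List.pyGetD x k 0 - PySem.List.pyGetD x (if k > 0 then k - 1 else 0) 0 > s) := by
        rw [hxk]; exact h
      rw [if_neg h]
      simp only [hp, decide_false]
      have hidx : (if k + 1 > 0 then k + 1 - 1 else 0) = k := by
        rw [if_pos (by omega)]; ring
      have := ih (k + 1) start h0 (by omega) hdrop' (by simp only [List.length_cons] at hlen ⊢; omega)
      rw [hidx, hxk, PySem.List.pyRange_one_succ_right hsk] at this
      simpa using this

-- ===== VERDICT (by name: the statement is the Claim_ definition above) =====
theorem cluster_by_separation_spec : Claim_equal_cluster_by_separation := by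
  intro x s _
  unfold Spec_cluster_by_separation cluster_by_separation cluster_by_separation_alt
  by_cases hx : x.length = 0
  · simp [hx]
  · have hxn : ¬ ((x.length : Int) = 0) := by exact_mod_cast hx
    simp only [hx, hxn, if_false]
    rw [lemA s x [] [] (PySem.List.pyGetD x 0 0) 0]
    rw [lemB (x.length : Int) _ [] 0]
    have := lemBridge x s x 0 0 (le_refl 0) (le_refl 0) (by simp) (by simp)
    simp only [show ¬ ((0 : Int) > 0) by omega, if_false] at this
    rw [PySem.List.pyRange_one_eq_nil (le_refl 0)] at this
    simpa using this
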